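-- pv_equiv track=rewrite | github.com/Uzi78/GKE_Hackathon | cultural_data.py | _parse_festivals_from_text
-- ===== SOURCE A (Python) =====
-- from typing import Dict, List, Any, Optional
--
-- def _parse_festivals_from_text(text: str, country: str, month: str = None) -> List[Dict]:
--     """Parse festival information from Wikipedia text extract"""
--     festivals = []
--
--     # Simple parsing - look for festival mentions
--     lines = text.split('\n')
--     current_festival = None
--
--     for line in lines:
--         line = line.strip()
--         if not line:
--             continue
--
--         # Look for festival names (usually capitalized or with dates)
--         if any(keyword in line.lower() for keyword in ['festival', 'celebration', 'holiday', 'day']):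
--             if current_festival:
--                 festivals.append(current_festival)
--
--             current_festival = {
--                 "name": line.split('.')[0].strip(),
--                 "date": month or "Various",
--                 "significance": line,
--                 "shopping_relevance": "Traditional clothing and local crafts"
--             }
--         elif current_festival and len(line) > 20:
--             # Add more details to current festival
--             current_festival["significance"] += f" {line}"
--
--     if current_festival:
--         festivals.append(current_festival)
--
--     return festivals[:5]  # Limit to 5 festivals
-- ===== SOURCE B (Python) =====
-- def _parse_festivals_from_text(text: str, country: str, month: str = None):
--     # Reverse single pass: scan lines back-to-front, buffering detail lines until
--     # their header is reached, and build the result list back-to-front.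
--     festivals = []
--     pending = []
--     for raw in reversed(text.split('\n')):
--         line = raw.strip()
--         if not line:
--             continue
--         if any(k in line.lower() for k in ('festival', 'celebration', 'holiday', 'day')):
--             festivals.insert(0, {
--                 "name": line.split('.')[0].strip(),
--                 "date": month or "Various",
--                 "significance": " ".join([line] + pending),
--                 "shopping_relevance": "Traditional clothing and local crafts",
--             })
--             pending = []
--         elif len(line) > 20:
--             pending.insert(0, line)
--     # detail lines left in `pending` preceded no header and are discarded
--     return festivals[:5]
-- ===== Notes on version B (the rewrite author's own statement) =====
-- stated objective: alternative
-- what changed: Replaces A's forward scan carrying a mutable 'current festival' dict with a reverse single pass: lines are scanned back-to-front, detail lines are buffered until their header is reached, and the result list is built back-to-front.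
import Mathlib
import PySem

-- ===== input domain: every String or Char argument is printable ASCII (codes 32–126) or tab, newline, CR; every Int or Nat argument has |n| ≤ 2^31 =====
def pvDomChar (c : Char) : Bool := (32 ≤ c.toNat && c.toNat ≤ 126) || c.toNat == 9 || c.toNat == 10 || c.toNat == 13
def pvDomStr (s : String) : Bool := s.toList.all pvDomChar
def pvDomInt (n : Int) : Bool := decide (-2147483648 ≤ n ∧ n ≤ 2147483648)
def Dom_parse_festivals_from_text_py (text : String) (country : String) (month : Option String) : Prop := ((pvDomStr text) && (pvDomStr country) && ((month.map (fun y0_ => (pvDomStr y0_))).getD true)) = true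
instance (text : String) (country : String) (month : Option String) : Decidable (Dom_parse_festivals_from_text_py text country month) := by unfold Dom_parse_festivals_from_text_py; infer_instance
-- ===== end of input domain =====

-- B replaces A's forward scan with a mutable "current festival" dict by a REVERSE single pass:
-- scan the lines back-to-front, buffering detail lines until their header is reached, and build
-- the result list back-to-front (objective: alternative, same asymptotic cost).

-- ===== PORT A =====

-- Python str '+', exact: concatenation of the character lists
def pvStrCat (a b : String) : String := String.ofList (a.toList ++ b.toList)

-- month or "Various" (None and "" are falsy)
def pvMonthOr (month : Option String) : String :=
  match month with
  | some m => if m = "" then "Various" else m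
  | none => "Various"

-- the dict literal built at a header line; line.split('.')[0] is the head of the split (split never returns [])
def pvNewFestivalA (line : String) (month : Option String) : List (String × String) :=
  [("name", PySem.Str.strip (((PySem.Str.split? line ".").getD []).headD "")),
   ("date", pvMonthOr month),
   ("significance", line),
   ("shopping_relevance", "Traditional clothing and local crafts")]

-- current_festival["significance"] += f" {line}"  (in-place update of the one key of the assoc list)
def pvAddSigA (cf : List (String × String)) (line : String) : List (String × String) :=
  cf.map (fun p => if p.1 == "significance" then (p.1, pvStrCat p.2 (pvStrCat " " line)) else p)

-- one iteration of A's for-loop; state = (festivals, current_festival)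
def pvStepA (month : Option String)
    (st : List (List (String × String)) × Option (List (String × String))) (line0 : String) :
    List (List (String × String)) × Option (List (String × String)) :=
  let line := PySem.Str.strip line0
  if line = "" then st
  else if ["festival", "celebration", "holiday", "day"].any
            (fun kw => PySem.Str.isIn kw (PySem.Str.lower line)) then
    match st.2 with
    | some cf => (st.1 ++ [cf], some (pvNewFestivalA line month))
    | none    => (st.1, some (pvNewFestivalA line month))
  else
    match st.2 with
    | some cf => if 20 < PySem.Str.len line then (st.1, some (pvAddSigA cf line)) else st
    | none    => st

def parse_festivals_from_text_py (text : String) (country : String) (month : Option String) : List (List (String × String)) :=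
  let lines := (PySem.Str.split? text "\n").getD []   -- separator ≠ "", so split? is always some
  let fin := lines.foldl (pvStepA month) ([], none)
  let festivals := match fin.2 with
    | some cf => fin.1 ++ [cf]
    | none    => fin.1
  festivals.take 5   -- festivals[:5], exact for a nonnegative literal bound

-- ===== PORT B =====

def pvIsFestivalHeaderB (line : String) : Bool :=
  ["festival", "celebration", "holiday", "day"].any
    (fun kw => PySem.Str.isIn kw (PySem.Str.lower line))

-- the dict B builds at a header: significance = " ".join([line] + pending)
def pvFestivalOfGroupB (month : Option String) (g : List String) : List (String × String) :=
  [("name", PySem.Str.strip (((PySem.Str.split? (g.headD "") ".").getD []).headD "")),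
   ("date", pvMonthOr month),
   ("significance", PySem.Str.join " " g),
   ("shopping_relevance", "Traditional clothing and local crafts")]

-- one iteration of B's loop over reversed(lines); state = (festivals, pending)
def pvStepB (month : Option String)
    (st : List (List (String × String)) × List String) (raw : String) :
    List (List (String × String)) × List String :=
  let line := PySem.Str.strip raw
  if line = "" then st
  else if pvIsFestivalHeaderB line then
    (pvFestivalOfGroupB month (line :: st.2) :: st.1, [])   -- festivals.insert(0, {...}); pending = []
  else if 20 < PySem.Str.len line then (st.1, line :: st.2) -- pending.insert(0, line)
  else st

def parse_festivals_from_text_py_alt (text : String) (country : String) (month : Option String) : List (List (String × String)) :=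
  let lines := (PySem.Str.split? text "\n").getD []
  ((lines.reverse.foldl (pvStepB month) ([], [])).1).take 5

-- ===== PRECONDITION & SPEC =====
def Spec_parse_festivals_from_text_py (text : String) (country : String) (month : Option String) (out : List (List (String × String))) : Prop := out = parse_festivals_from_text_py_alt text country month
instance (text : String) (country : String) (month : Option String) (out : List (List (String × String))) : Decidable (Spec_parse_festivals_from_text_py text country month out) := by unfold Spec_parse_festivals_from_text_py; infer_instance

-- ===== CLAIM (what is proved, stated in full; the proofs are below) =====
def Claim_equal_parse_festivals_from_text_py : Prop := ∀ (text : String) (country : String) (month : Option String), Dom_parse_festivals_from_text_py text country month → Spec_parse_festivals_from_text_py text country month (parse_festivals_from_text_py text country month)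

-- ===== LEMMAS AND PROOFS =====

-- A's step on an already-stripped non-empty line (the strip/skip branch removed)
def pvCoreA (month : Option String)
    (st : List (List (String × String)) × Option (List (String × String))) (line : String) :
    List (List (String × String)) × Option (List (String × String)) :=
  if pvIsFestivalHeaderB line then
    match st.2 with
    | some cf => (st.1 ++ [cf], some (pvNewFestivalA line month))
    | none    => (st.1, some (pvNewFestivalA line month))
  else
    match st.2 with
    | some cf => if 20 < PySem.Str.len line then (st.1, some (pvAddSigA cf line)) else st
    | none    => st

-- B's step on an already-stripped non-empty line
def pvCoreB (month : Option String)
    (st : List (List (String × String)) × List String) (line : String) :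
    List (List (String × String)) × List String :=
  if pvIsFestivalHeaderB line then (pvFestivalOfGroupB month (line :: st.2) :: st.1, [])
  else if 20 < PySem.Str.len line then (st.1, line :: st.2)
  else st

theorem pvStepA_eq (month : Option String) (st : List (List (String × String)) × Option (List (String × String))) (line0 : String) :
    pvStepA month st line0 =
      (if PySem.Str.strip line0 = "" then st else pvCoreA month st (PySem.Str.strip line0)) := by
  rfl

theorem pvStepB_eq (month : Option String) (st : List (List (String × String)) × List String) (line0 : String) :
    pvStepB month st line0 =
      (if PySem.Str.strip line0 = "" then st else pvCoreB month st (PySem.Str.strip line0)) := by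
  rfl

theorem pvFoldA_fusion (month : Option String) (ls : List String)
    (st : List (List (String × String)) × Option (List (String × String))) :
    ls.foldl (pvStepA month) st =
      ((ls.map PySem.Str.strip).filter (fun s => s != "")).foldl (pvCoreA month) st := by
  induction ls generalizing st with
  | nil => rfl
  | cons l ls ih =>
    simp only [List.foldl_cons, List.map_cons, List.filter_cons, pvStepA_eq]
    by_cases h : PySem.Str.strip l = ""
    · simp [h, ih]
    · simp [h, ih]

theorem pvFoldB_fusion (month : Option String) (ls : List String)
    (st : List (List (String × String)) × List String) :
    ls.foldl (pvStepB month) st =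
      ((ls.map PySem.Str.strip).filter (fun s => s != "")).foldl (pvCoreB month) st := by
  induction ls generalizing st with
  | nil => rfl
  | cons l ls ih =>
    simp only [List.foldl_cons, List.map_cons, List.filter_cons, pvStepB_eq]
    by_cases h : PySem.Str.strip l = ""
    · simp [h, ih]
    · simp [h, ih]

-- P ls: the detail lines of ls preceding its first header; G ls: the festival blocks of ls
def pvP (ls : List String) : List String :=
  match ls with
  | [] => []
  | l :: rest =>
    if pvIsFestivalHeaderB l then []
    else if 20 < PySem.Str.len l then l :: pvP rest
    else pvP rest

def pvG (ls : List String) : List (List String) :=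
  match ls with
  | [] => []
  | l :: rest =>
    if pvIsFestivalHeaderB l then (l :: pvP rest) :: pvG rest
    else pvG rest

theorem pvLenIff (l : String) : ((20:Int) < PySem.Str.len l) ↔ (20 < l.length) := by
  simp [PySem.Str.len]

-- B's core fold over the reversed line list computes (map f (G ls), P ls)
theorem pvRevFold (month : Option String) (ls : List String) :
    ls.foldr (fun x st => pvCoreB month st x) ([], []) =
      ((pvG ls).map (pvFestivalOfGroupB month), pvP ls) := by
  induction ls with
  | nil => rfl
  | cons l rest ih =>
    rw [List.foldr_cons, ih]
    by_cases h1 : pvIsFestivalHeaderB l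
    · simp [pvCoreB, pvG, pvP, h1]
    · by_cases h2 : 20 < PySem.Str.len l
      all_goals rw [pvLenIff] at h2
      · simp [pvCoreB, pvG, pvP, pvLenIff, h1, h2]
      · simp [pvCoreB, pvG, pvP, pvLenIff, h1, h2]

-- ----- A side: the grouping fold (proof device) and its relation to A's state -----

def pvGroupStepB (gs : List (List String)) (line : String) : List (List String) :=
  if pvIsFestivalHeaderB line then gs ++ [[line]]
  else if gs ≠ [] ∧ 20 < PySem.Str.len line then
    gs.dropLast ++ [(gs.getLast?.getD []) ++ [line]]
  else gs

def pvAbst (month : Option String) (gs : List (List String)) :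
    List (List (String × String)) × Option (List (String × String)) :=
  (gs.dropLast.map (pvFestivalOfGroupB month), gs.getLast?.map (pvFestivalOfGroupB month))

theorem pvStrCat_toList (a b : String) : (pvStrCat a b).toList = a.toList ++ b.toList := by
  simp [pvStrCat]

theorem pvJoin_concat (sep l : List Char) (xs : List (List Char)) (h : xs ≠ []) :
    PySem.Chars.join sep (xs ++ [l]) = PySem.Chars.join sep xs ++ sep ++ l := by
  induction xs with
  | nil => exact absurd rfl h
  | cons x xs ih =>
    cases xs with
    | nil => simp [PySem.Chars.join_cons_cons, PySem.Chars.join_singleton]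
    | cons y ys =>
      have ih' := ih (by simp)
      simp only [List.cons_append] at ih' ⊢
      rw [PySem.Chars.join_cons_cons, ih', PySem.Chars.join_cons_cons]
      simp

theorem pvStrExt (a b : String) (h : a.toList = b.toList) : a = b := by
  have := congrArg String.ofList h
  rwa [String.ofList_toList, String.ofList_toList] at this

theorem pvJoin_single (l : String) : PySem.Str.join " " [l] = l := by
  apply pvStrExt
  simp [PySem.Str.toList_join, PySem.Chars.join_singleton]

theorem pvNew_eq_rec (month : Option String) (line : String) :
    pvNewFestivalA line month = pvFestivalOfGroupB month [line] := by
  simp [pvNewFestivalA, pvFestivalOfGroupB, pvJoin_single]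

theorem pvAddSig_eq_rec (month : Option String) (g : List String) (line : String) (h : g ≠ []) :
    pvAddSigA (pvFestivalOfGroupB month g) line = pvFestivalOfGroupB month (g ++ [line]) := by
  simp only [pvAddSigA, pvFestivalOfGroupB, List.map_cons, List.map_nil]
  norm_num
  refine ⟨?_, ?_, ?_, ?_⟩
  · rw [if_neg (by decide)]
    cases g with
    | nil => exact absurd rfl h
    | cons x xs => rfl
  · intro hc; exact absurd hc (by decide)
  · apply pvStrExt
    simp only [pvStrCat_toList, PySem.Str.toList_join, List.map_append, List.map_cons,
      List.map_nil]
    rw [pvJoin_concat _ _ _ (by simpa using h)]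
    simp
  · intro hc; exact absurd hc (by decide)

theorem pvCore_abst (month : Option String) (gs : List (List String)) (line : String)
    (h : ∀ g ∈ gs, g ≠ []) :
    pvCoreA month (pvAbst month gs) line = pvAbst month (pvGroupStepB gs line) := by
  rcases List.eq_nil_or_concat gs with rfl | ⟨gs', g, rfl⟩
  · by_cases hh : pvIsFestivalHeaderB line
    · simp [pvCoreA, pvGroupStepB, pvAbst, hh, pvNew_eq_rec]
    · simp [pvCoreA, pvGroupStepB, pvAbst, hh]
  · have hg : g ≠ [] := h g (by simp)
    by_cases hh : pvIsFestivalHeaderB line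
    · simp [pvCoreA, pvGroupStepB, pvAbst, hh, pvNew_eq_rec]
    · simp only [pvCoreA, pvGroupStepB, pvAbst, hh, Bool.false_eq_true, if_false]
      simp
      split_ifs with hl <;> simp [pvAddSig_eq_rec month g line hg]

theorem pvGroupStep_ne (gs : List (List String)) (line : String) (h : ∀ g ∈ gs, g ≠ []) :
    ∀ g ∈ pvGroupStepB gs line, g ≠ [] := by
  intro g hg
  unfold pvGroupStepB at hg
  split_ifs at hg with h1 h2
  · rcases List.mem_append.1 hg with hm | hm
    · exact h g hm
    · simp at hm; simp [hm]
  · rcases List.mem_append.1 hg with hm | hm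
    · exact h g (List.dropLast_sublist gs |>.subset hm)
    · simp at hm; simp [hm]
  · exact h g hg

theorem pvInv (month : Option String) (ls : List String) (gs : List (List String))
    (h : ∀ g ∈ gs, g ≠ []) :
    ls.foldl (pvCoreA month) (pvAbst month gs) = pvAbst month (ls.foldl pvGroupStepB gs) := by
  induction ls generalizing gs with
  | nil => rfl
  | cons l ls ih =>
    rw [List.foldl_cons, List.foldl_cons, pvCore_abst month gs l h,
      ih _ (pvGroupStep_ne gs l h)]

theorem pvFinal (month : Option String) (gs : List (List String)) :
    (match (pvAbst month gs).2 with
      | some cf => (pvAbst month gs).1 ++ [cf]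
      | none    => (pvAbst month gs).1) = gs.map (pvFestivalOfGroupB month) := by
  rcases List.eq_nil_or_concat gs with rfl | ⟨gs', g, rfl⟩
  · rfl
  · simp [pvAbst]

-- the grouping fold, run from a nonempty accumulator, appends P to the last group and then G
theorem pvGroupFold_concat (ls : List String) (gs : List (List String)) (g : List String) :
    ls.foldl pvGroupStepB (gs ++ [g]) = gs ++ (g ++ pvP ls) :: pvG ls := by
  induction ls generalizing gs g with
  | nil => simp [pvP, pvG]
  | cons l rest ih =>
    by_cases h1 : pvIsFestivalHeaderB l
    · rw [List.foldl_cons,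
        show pvGroupStepB (gs ++ [g]) l = (gs ++ [g]) ++ [[l]] by simp [pvGroupStepB, h1],
        ih (gs ++ [g]) [l]]
      simp [pvP, pvG, h1]
    · by_cases h2 : 20 < PySem.Str.len l
      all_goals rw [pvLenIff] at h2
      · rw [List.foldl_cons,
          show pvGroupStepB (gs ++ [g]) l = gs ++ [g ++ [l]] by
            simp [pvGroupStepB, pvLenIff, h1, h2],
          ih gs (g ++ [l])]
        simp [pvP, pvG, pvLenIff, h1, h2]
      · rw [List.foldl_cons,
          show pvGroupStepB (gs ++ [g]) l = gs ++ [g] by simp [pvGroupStepB, pvLenIff, h1, h2],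
          ih gs g]
        simp [pvP, pvG, pvLenIff, h1, h2]

theorem pvGroupFold_nil (ls : List String) :
    ls.foldl pvGroupStepB [] = pvG ls := by
  induction ls with
  | nil => rfl
  | cons l rest ih =>
    by_cases h1 : pvIsFestivalHeaderB l
    · rw [List.foldl_cons,
        show pvGroupStepB [] l = [] ++ [[l]] by simp [pvGroupStepB, h1],
        pvGroupFold_concat]
      simp [pvG, h1]
    · rw [List.foldl_cons, show pvGroupStepB [] l = [] by simp [pvGroupStepB, h1], ih]
      simp [pvG, h1]

-- ===== VERDICT (by name: the statement is the Claim_ definition above) =====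
theorem parse_festivals_from_text_py_spec : Claim_equal_parse_festivals_from_text_py := by
  intro text country month _
  unfold Spec_parse_festivals_from_text_py
  unfold parse_festivals_from_text_py parse_festivals_from_text_py_alt
  simp only []
  rw [pvFoldA_fusion, pvFoldB_fusion,
    show (([] : List (List (String × String))), (none : Option (List (String × String)))) = pvAbst month [] from rfl,
    pvInv month _ [] (by simp), pvFinal, pvGroupFold_nil]
  rw [show ((((PySem.Str.split? text "\n").getD []).reverse.map PySem.Str.strip).filter (fun s => s != ""))
        = ((((PySem.Str.split? text "\n").getD []).map PySem.Str.strip).filter (fun s => s != "")).reverse by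
      simp [List.map_reverse, List.filter_reverse]]
  rw [List.foldl_reverse, pvRevFold]
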